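-- pv_equiv track=rewrite | github.com/prabal1997/uva_judge | chapter_5/reverse_and_add.py | give_palindrome
-- ===== SOURCE A (Python) =====
-- def give_palindrome(number):
--      number = list(number);
--      number = [int(digit) for digit in number];
--
--      rev_num = number[::-1];
--
--      number, rev_num = [0] + number, [0] + rev_num;
--      carry_arr, sum_arr = [0] * (len(number)+1), ['0'] * len(number);
--
--      number, rev_num = number[::-1], rev_num[::-1]
--      for digit in range(len(number)):
--           sum_val = number[digit] + rev_num[digit] + carry_arr[digit];
--           sum_arr[digit] = str(sum_val%10);
--           carry_arr[digit+1] = sum_val//10;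
--
--      sum_arr = str(int("".join(sum_arr[::-1])));
--
--      return sum_arr
-- ===== SOURCE B (Python) =====
-- def give_palindrome(number):
--      n = 0
--      for c in number:
--           n = n * 10 + int(c)
--      r = 0
--      for c in reversed(number):
--           r = r * 10 + int(c)
--      return str(n + r)
-- ===== Notes on version B (the rewrite author's own statement) =====
-- stated objective: simpler
-- what changed: B replaces A's manual schoolbook addition (reversed digit lists, explicit carry and per-digit sum arrays, then re-parsing the joined digit string) by two left-to-right numeric folds n = n*10+int(c) over the string and its reverse, delegating all carry handling to native integer addition in str(n + r).
import Mathlib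
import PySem

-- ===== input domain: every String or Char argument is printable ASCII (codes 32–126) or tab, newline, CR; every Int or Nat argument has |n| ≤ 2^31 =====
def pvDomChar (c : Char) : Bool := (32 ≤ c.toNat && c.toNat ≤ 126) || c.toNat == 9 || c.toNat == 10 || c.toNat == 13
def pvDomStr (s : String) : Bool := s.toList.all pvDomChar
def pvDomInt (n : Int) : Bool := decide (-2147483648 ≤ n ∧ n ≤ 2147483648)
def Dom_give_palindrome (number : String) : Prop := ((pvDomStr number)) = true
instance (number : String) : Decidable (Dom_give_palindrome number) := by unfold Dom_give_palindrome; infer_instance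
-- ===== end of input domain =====

-- B replaces A's manual digit/carry schoolbook addition by two numeric folds and native
-- integer addition (objective: simpler).

-- ===== PORT A =====
-- int(s) for the string "".join(sum_arr[::-1]): at this call site the argument is always a
-- nonempty string of ASCII digits '0'-'9' (each piece is str(x % 10)), and on such strings
-- Python's int(s) is exactly this left fold (leading zeros allowed and stripped by value).
-- Hand-ported for this call site.
def pyIntDigits (cs : List Char) : Int :=
  cs.foldl (fun a c => a * 10 + ((c.toNat : Int) - 48)) 0

def give_palindrome (number : String) : String :=
  let number0 := number.toList
  let number1 : List Int := number0.map (fun digit => (PySem.Int.ofChars? [digit]).getD 0)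
  let rev_num : List Int := (PySem.List.slice? number1 none none (-1)).getD []
  let number2 := (0 : Int) :: number1
  let rev_num2 := (0 : Int) :: rev_num
  let carry_arr : List Int := List.replicate ((PySem.List.len number2 + 1).toNat) 0
  let sum_arr : List (List Char) := List.replicate ((PySem.List.len number2).toNat) ['0']
  let number3 := (PySem.List.slice? number2 none none (-1)).getD []
  let rev_num3 := (PySem.List.slice? rev_num2 none none (-1)).getD []
  let st :=
    (PySem.List.pyRange 0 (PySem.List.len number3) 1).foldl
      (fun (st : List Int × List (List Char)) digit =>
        let sum_val := PySem.List.pyGetD number3 digit 0 + PySem.List.pyGetD rev_num3 digit 0 +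
          PySem.List.pyGetD st.1 digit 0
        (PySem.List.pySetD st.1 (digit + 1) (PySem.Int.floordiv sum_val 10),
         PySem.List.pySetD st.2 digit (PySem.Int.toChars (PySem.Int.mod sum_val 10))))
      (carry_arr, sum_arr)
  let joined := PySem.Chars.join [] ((PySem.List.slice? st.2 none none (-1)).getD [])
  PySem.Int.toStr (pyIntDigits joined)

-- ===== PORT B =====
def give_palindrome_alt (number : String) : String :=
  let n := number.toList.foldl (fun a c => a * 10 + (PySem.Int.ofChars? [c]).getD 0) 0
  let r := number.toList.reverse.foldl (fun a c => a * 10 + (PySem.Int.ofChars? [c]).getD 0) 0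
  PySem.Int.toStr (n + r)

-- ===== PRECONDITION & SPEC =====
-- Pre_: exactly the inputs on which Python A returns: every character a decimal digit
-- (otherwise int(digit) raises ValueError). The empty string is admitted (A returns "0").
def Pre_give_palindrome (number : String) : Prop :=
  number.toList.all Char.isDigit = true
instance (number : String) : Decidable (Pre_give_palindrome number) := by
  unfold Pre_give_palindrome; infer_instance

def pvWitness_give_palindrome : String := "12"

def Spec_give_palindrome (number : String) (out : String) : Prop := out = give_palindrome_alt number
instance (number : String) (out : String) : Decidable (Spec_give_palindrome number out) := by
  unfold Spec_give_palindrome; infer_instance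

-- ===== CLAIM (what is proved, stated in full; the proofs are below) =====
def Claim_equal_give_palindrome : Prop := ∀ (number : String), Dom_give_palindrome number → Pre_give_palindrome number → Spec_give_palindrome number (give_palindrome number)

-- ===== LEMMAS AND PROOFS =====

-- digit value of a character
def dval (c : Char) : Int := (c.toNat : Int) - 48

-- value of a least-significant-digit-first list
def valL (ds : List Int) : Int := ds.foldr (fun d a => a * 10 + d) 0

-- schoolbook addition on zipped LSB digit lists with incoming carry:
-- (per-position digits, final carry)
def sch : List (Int × Int) → Int → List Int × Int
  | [], c => ([], c)
  | p :: t, c =>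
    let s := p.1 + p.2 + c
    let r := sch t (PySem.Int.floordiv s 10)
    (PySem.Int.mod s 10 :: r.1, r.2)

-- all carries entering positions 0..n (length ps.length + 1)
def carries : List (Int × Int) → Int → List Int
  | [], c => [c]
  | p :: t, c => c :: carries t (PySem.Int.floordiv (p.1 + p.2 + c) 10)

theorem length_sch1 (ps : List (Int × Int)) (c : Int) : (sch ps c).1.length = ps.length := by
  induction ps generalizing c with
  | nil => rfl
  | cons p t ih => simp [sch, ih]

theorem carries_getD_last (ps : List (Int × Int)) (c d : Int) :
    (carries ps c).getD ps.length d = (sch ps c).2 := by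
  induction ps generalizing c with
  | nil => rfl
  | cons p t ih =>
    simp only [carries, sch, List.length_cons, List.getD_cons_succ]
    exact ih _

theorem sch_append (ps : List (Int × Int)) (p : Int × Int) (c : Int) :
    sch (ps ++ [p]) c =
      ((sch ps c).1 ++ [PySem.Int.mod (p.1 + p.2 + (sch ps c).2) 10],
        PySem.Int.floordiv (p.1 + p.2 + (sch ps c).2) 10) := by
  induction ps generalizing c with
  | nil => rfl
  | cons q t ih => simp [sch, ih]

theorem carries_append (ps : List (Int × Int)) (p : Int × Int) (c : Int) :
    carries (ps ++ [p]) c =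
      carries ps c ++ [PySem.Int.floordiv (p.1 + p.2 + (sch ps c).2) 10] := by
  induction ps generalizing c with
  | nil => rfl
  | cons q t ih => simp [carries, sch, ih]

theorem sch_val (ps : List (Int × Int)) (c : Int) :
    valL (sch ps c).1 + (sch ps c).2 * 10 ^ ps.length =
      valL (ps.map (fun p => p.1 + p.2)) + c := by
  induction ps generalizing c with
  | nil => simp [sch, valL]
  | cons p t ih =>
    have h := ih (PySem.Int.floordiv (p.1 + p.2 + c) 10)
    have hdm := PySem.Int.floordiv_mul_add_mod (p.1 + p.2 + c) 10
    simp only [sch, valL, List.foldr_cons, List.map_cons, List.length_cons] at *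
    ring_nf at h ⊢
    nlinarith [h]

theorem sch_digits (ps : List (Int × Int)) (c : Int) :
    ∀ d ∈ (sch ps c).1, 0 ≤ d ∧ d < 10 := by
  induction ps generalizing c with
  | nil => simp [sch]
  | cons p t ih =>
    intro d hd
    simp only [sch, List.mem_cons] at hd
    rcases hd with h | h
    · subst h
      exact ⟨PySem.Int.mod_nonneg _ (by norm_num), PySem.Int.mod_lt _ (by norm_num)⟩
    · exact ih _ d h

theorem sch_carry01 (ps : List (Int × Int)) (c : Int)
    (hps : ∀ p ∈ ps, (0 ≤ p.1 ∧ p.1 < 10) ∧ (0 ≤ p.2 ∧ p.2 < 10))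
    (hc0 : 0 ≤ c) (hc1 : c ≤ 1) : 0 ≤ (sch ps c).2 ∧ (sch ps c).2 ≤ 1 := by
  induction ps generalizing c with
  | nil => exact ⟨hc0, hc1⟩
  | cons p t ih =>
    have hp := hps p (by simp)
    have hs : PySem.Int.floordiv (p.1 + p.2 + c) 10 = (p.1 + p.2 + c) / 10 :=
      PySem.Int.floordiv_eq_ediv_of_pos (by norm_num)
    have h0 : 0 ≤ (p.1 + p.2 + c) / 10 := by omega
    have h1 : (p.1 + p.2 + c) / 10 ≤ 1 := by omega
    exact ih _ (fun q hq => hps q (by simp [hq])) (hs ▸ h0) (hs ▸ h1)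

theorem dval_bounds (c : Char) (h : c.isDigit = true) : 0 ≤ dval c ∧ dval c < 10 := by
  have : 48 ≤ c.toNat ∧ c.toNat ≤ 57 := by
    simp [Char.isDigit, UInt32.le_iff_toNat_le] at h
    exact ⟨by exact_mod_cast h.1, by exact_mod_cast h.2⟩
  unfold dval
  omega

theorem char_of_toNat (c : Char) (n : Nat) (h : c.toNat = n) (c' : Char) (h' : c'.toNat = n) :
    c = c' := by
  apply Char.ext
  apply UInt32.toNat_inj.mp
  exact h.trans h'.symm

theorem ofChars_single (c : Char) (h : c.isDigit = true) :
    PySem.Int.ofChars? [c] = some (dval c) := by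
  have hb : 48 ≤ c.toNat ∧ c.toNat ≤ 57 := by
    simp [Char.isDigit, UInt32.le_iff_toNat_le] at h
    exact ⟨by exact_mod_cast h.1, by exact_mod_cast h.2⟩
  obtain ⟨hb1, hb2⟩ := hb
  interval_cases hcn : c.toNat <;>
    [ rw [char_of_toNat c _ hcn '0' (by decide)];
      rw [char_of_toNat c _ hcn '1' (by decide)];
      rw [char_of_toNat c _ hcn '2' (by decide)];
      rw [char_of_toNat c _ hcn '3' (by decide)];
      rw [char_of_toNat c _ hcn '4' (by decide)];
      rw [char_of_toNat c _ hcn '5' (by decide)];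
      rw [char_of_toNat c _ hcn '6' (by decide)];
      rw [char_of_toNat c _ hcn '7' (by decide)];
      rw [char_of_toNat c _ hcn '8' (by decide)];
      rw [char_of_toNat c _ hcn '9' (by decide)] ] <;>
    simp [dval] <;> decide

-- str(d) for a single digit 0 ≤ d < 10 is one character, of digit value d
theorem toChars_digit (d : Int) (h0 : 0 ≤ d) (h1 : d < 10) :
    PySem.Int.toChars d = [Char.ofNat (48 + d.toNat)] ∧ dval (Char.ofNat (48 + d.toNat)) = d := by
  interval_cases d <;> exact ⟨by decide, by decide⟩

theorem valL_zip_add (X Y : List Int) (h : X.length = Y.length) :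
    valL (((X.zip Y).map (fun p => p.1 + p.2))) = valL X + valL Y := by
  induction X generalizing Y with
  | nil =>
    have hy : Y = [] := List.eq_nil_of_length_eq_zero (by simpa using h.symm)
    subst hy
    simp [valL]
  | cons x t ih =>
    cases Y with
    | nil => simp at h
    | cons y u =>
      have h' : t.length = u.length := by simpa using h
      simp only [List.zip_cons_cons, List.map_cons, valL, List.foldr_cons] at *
      rw [ih u h']
      ring

theorem valL_append_zero (X : List Int) : valL (X ++ [0]) = valL X := by
  unfold valL
  rw [List.foldr_append]
  norm_num

theorem getD_append_length {α : Type} (A : List α) (b : α) (B : List α) (d : α) :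
    (A ++ b :: B).getD A.length d = b := by
  induction A with
  | nil => rfl
  | cons a t _ => simp

theorem set_append_length {α : Type} (A : List α) (b : α) (B : List α) (v : α) :
    (A ++ b :: B).set A.length v = A ++ v :: B := by
  induction A with
  | nil => rfl
  | cons a t ih => simp

theorem getD_append_lt {α : Type} (A B : List α) (i : Nat) (d : α) (h : i < A.length) :
    (A ++ B).getD i d = A.getD i d := by
  simp [List.getD, List.getElem?_append_left h]

theorem length_carries (ps : List (Int × Int)) (c : Int) :
    (carries ps c).length = ps.length + 1 := by
  induction ps generalizing c with
  | nil => rfl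
  | cons p t ih => simp [carries, ih]

-- the loop invariant: processing the remaining indices extends carries/sum digits
theorem loop_inv (xs ys : List Int) (rest : List (Int × Int)) :
    ∀ (pre : List (Int × Int)),
    xs = (pre ++ rest).map Prod.fst → ys = (pre ++ rest).map Prod.snd →
    (PySem.List.pyRange (pre.length : Int) ((pre ++ rest).length : Int) 1).foldl
      (fun (st : List Int × List (List Char)) digit =>
        let sum_val := PySem.List.pyGetD xs digit 0 + PySem.List.pyGetD ys digit 0 +
          PySem.List.pyGetD st.1 digit 0
        (PySem.List.pySetD st.1 (digit + 1) (PySem.Int.floordiv sum_val 10),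
         PySem.List.pySetD st.2 digit (PySem.Int.toChars (PySem.Int.mod sum_val 10))))
      (carries pre 0 ++ List.replicate rest.length 0,
       (sch pre 0).1.map PySem.Int.toChars ++ List.replicate rest.length ['0'])
    = (carries (pre ++ rest) 0, (sch (pre ++ rest) 0).1.map PySem.Int.toChars) := by
  induction rest with
  | nil =>
    intro pre hx hy
    have hr : PySem.List.pyRange (pre.length : Int) ((pre ++ []).length : Int) 1 = [] := by
      simp [PySem.List.pyRange]
    rw [hr]
    simp
  | cons p rest' ih =>
    intro pre hx hy
    have hlt : (pre.length : Int) < ((pre ++ p :: rest').length : Int) := by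
      simp
    rw [PySem.List.pyRange_one_cons hlt, List.foldl_cons]
    -- reduce the one step to the (pre ++ [p]) state
    have hgx : PySem.List.pyGetD xs (pre.length : Int) 0 = p.1 := by
      rw [hx, PySem.List.pyGetD_natCast]
      have : (pre ++ p :: rest').map Prod.fst = pre.map Prod.fst ++ p.1 :: rest'.map Prod.fst := by
        simp
      rw [this]
      have hl : (pre.map Prod.fst).length = pre.length := by simp
      rw [← hl]
      exact getD_append_length _ _ _ _
    have hgy : PySem.List.pyGetD ys (pre.length : Int) 0 = p.2 := by
      rw [hy, PySem.List.pyGetD_natCast]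
      have : (pre ++ p :: rest').map Prod.snd = pre.map Prod.snd ++ p.2 :: rest'.map Prod.snd := by
        simp
      rw [this]
      have hl : (pre.map Prod.snd).length = pre.length := by simp
      rw [← hl]
      exact getD_append_length _ _ _ _
    have hgc : PySem.List.pyGetD (carries pre 0 ++ List.replicate (p :: rest').length 0)
        (pre.length : Int) 0 = (sch pre 0).2 := by
      rw [PySem.List.pyGetD_natCast,
        getD_append_lt _ _ _ _ (by rw [length_carries]; omega),
        carries_getD_last]
    set s : Int := p.1 + p.2 + (sch pre 0).2 with hs
    have hsetc : PySem.List.pySetD (carries pre 0 ++ List.replicate (p :: rest').length 0)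
        ((pre.length : Int) + 1) (PySem.Int.floordiv s 10)
        = carries (pre ++ [p]) 0 ++ List.replicate rest'.length 0 := by
      have hcast : ((pre.length : Int) + 1) = ((pre.length + 1 : Nat) : Int) := by push_cast; ring
      rw [hcast, PySem.List.pySetD_natCast]
      have h1 : carries pre 0 ++ List.replicate (p :: rest').length 0
          = carries pre 0 ++ (0 : Int) :: List.replicate rest'.length 0 := by
        simp [List.replicate_succ]
      rw [h1]
      have h2 : pre.length + 1 = (carries pre 0).length := by rw [length_carries]
      rw [h2, set_append_length, carries_append]
      simp
      rw [hs]
    have hsets : PySem.List.pySetD ((sch pre 0).1.map PySem.Int.toChars ++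
          List.replicate (p :: rest').length ['0'])
        (pre.length : Int) (PySem.Int.toChars (PySem.Int.mod s 10))
        = (sch (pre ++ [p]) 0).1.map PySem.Int.toChars ++ List.replicate rest'.length ['0'] := by
      rw [PySem.List.pySetD_natCast]
      have h1 : (sch pre 0).1.map PySem.Int.toChars ++ List.replicate (p :: rest').length ['0']
          = (sch pre 0).1.map PySem.Int.toChars ++ ['0'] :: List.replicate rest'.length ['0'] := by
        simp [List.replicate_succ]
      rw [h1]
      have h2 : pre.length = ((sch pre 0).1.map PySem.Int.toChars).length := by
        rw [List.length_map, length_sch1]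
      rw [h2, set_append_length, sch_append]
      simp
      rw [hs]
    have hx' : xs = ((pre ++ [p]) ++ rest').map Prod.fst := by rw [hx]; simp
    have hy' : ys = ((pre ++ [p]) ++ rest').map Prod.snd := by rw [hy]; simp
    have hstep := ih (pre ++ [p]) hx' hy'
    simp only [hgx, hgy, hgc, ← hs, hsetc, hsets] at *
    have hrange : PySem.List.pyRange ((pre.length : Int) + 1)
        ((pre ++ p :: rest').length : Int) 1
        = PySem.List.pyRange (((pre ++ [p]).length : Nat) : Int)
          ((((pre ++ [p]) ++ rest').length : Nat) : Int) 1 := by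
      congr 1 <;> simp
    rw [hrange]
    rw [hstep]
    congr 1 <;> simp



theorem valL_reverse (ds : List Int) :
    valL ds.reverse = ds.foldl (fun a d => a * 10 + d) 0 := by
  unfold valL
  rw [List.foldr_reverse]

theorem foldl_digits (l : List Char) (h : ∀ c ∈ l, c.isDigit = true) :
    l.foldl (fun a c => a * 10 + (PySem.Int.ofChars? [c]).getD 0) 0
      = valL (l.map dval).reverse := by
  rw [valL_reverse, List.foldl_map]
  exact PySem.List.foldl_congr_mem l _ _ 0 (fun acc c hc => by rw [ofChars_single c (h c hc)]; rfl)

-- main equivalence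
theorem ports_agree (number : String) (hpre : ∀ c ∈ number.toList, c.isDigit = true) :
    give_palindrome number = give_palindrome_alt number := by
  unfold give_palindrome give_palindrome_alt
  simp only [PySem.List.slice?_none_none_neg_one, Option.getD_some, PySem.List.len_eq]
  set l := number.toList with hl
  set ds := l.map dval with hds
  have hmap : l.map (fun digit => (PySem.Int.ofChars? [digit]).getD 0) = ds := by
    rw [hds]
    exact List.map_congr_left (fun c hc => by rw [ofChars_single c (hpre c hc)]; rfl)
  rw [hmap]
  set X : List Int := ds.reverse ++ [0] with hX
  set Y : List Int := ds ++ [0] with hY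
  have hrevc : ((0 : Int) :: ds).reverse = X := by simp [hX]
  have hrevc2 : ((0 : Int) :: ds.reverse).reverse = Y := by simp [hY]
  rw [hrevc, hrevc2]
  set zs := X.zip Y with hzs
  have hXlen : X.length = ds.length + 1 := by simp [hX]
  have hYlen : Y.length = ds.length + 1 := by simp [hY]
  have hzslen : zs.length = ds.length + 1 := by simp [hzs, hXlen, hYlen]
  have hx : X = zs.map Prod.fst := by
    rw [hzs, List.map_fst_zip (le_of_eq (hXlen.trans hYlen.symm))]
  have hy : Y = zs.map Prod.snd := by
    rw [hzs, List.map_snd_zip (le_of_eq (hYlen.trans hXlen.symm))]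
  have hloop := loop_inv X Y zs [] hx hy
  simp only [List.nil_append, List.length_nil, Nat.cast_zero] at hloop
  have hinitc : List.replicate ((((0 : Int) :: ds).length : Int) + 1).toNat (0 : Int)
      = carries [] 0 ++ List.replicate zs.length 0 := by
    have h1 : ((((0 : Int) :: ds).length : Int) + 1).toNat = zs.length + 1 := by
      simp [hzslen]; omega
    rw [h1, carries]
    simp [List.replicate_succ]
  have hinits : List.replicate (((((0 : Int) :: ds).length : Int)).toNat) (['0'] : List Char)
      = (sch [] 0).1.map PySem.Int.toChars ++ List.replicate zs.length ['0'] := by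
    have h1 : ((((0 : Int) :: ds).length : Int)).toNat = zs.length := by
      simp [hzslen]
    rw [h1, sch]
    simp
  have hrange : ((X.length : Int)) = ((zs.length : Nat) : Int) := by
    rw [hXlen, hzslen]
  rw [hinitc, hinits, hrange, hloop]
  -- the final string: join the digit characters (most significant first) and parse back
  set digs := (sch zs 0).1 with hdigs
  have hdigb := sch_digits zs 0
  have hjoin : PySem.Chars.join [] (digs.reverse.map PySem.Int.toChars)
      = digs.reverse.map (fun d => Char.ofNat (48 + d.toNat)) := by
    have h1 : digs.reverse.map PySem.Int.toChars
        = (digs.reverse.map (fun d => Char.ofNat (48 + d.toNat))).map (fun c => [c]) := by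
      rw [List.map_map]
      refine List.map_congr_left (fun d hd => ?_)
      have hb := hdigb d (hdigs ▸ List.mem_reverse.mp hd)
      exact (toChars_digit d hb.1 hb.2).1
    rw [h1, PySem.Chars.join_nil_singletons]
  simp only [] at *
  rw [← List.map_reverse, hjoin]
  have hparse : pyIntDigits (digs.reverse.map (fun d => Char.ofNat (48 + d.toNat)))
      = valL digs := by
    unfold pyIntDigits
    rw [List.foldl_map]
    have h2 : ∀ (acc : Int), ∀ d ∈ digs.reverse,
        acc * 10 + (((Char.ofNat (48 + d.toNat)).toNat : Int) - 48) = acc * 10 + d := by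
      intro acc d hd
      have hb := hdigb d (by exact List.mem_reverse.mp hd)
      have := (toChars_digit d hb.1 hb.2).2
      unfold dval at this
      rw [this]
    rw [PySem.List.foldl_congr_mem _ _ _ 0 h2, ← valL_reverse, List.reverse_reverse]
  rw [hparse]
  -- numeric value of the schoolbook sum
  have hzap : zs = (ds.reverse.zip ds) ++ [((0 : Int), (0 : Int))] := by
    rw [hzs, hX, hY, List.zip_append (by simp)]
    simp
  have hbounds : ∀ p ∈ ds.reverse.zip ds, (0 ≤ p.1 ∧ p.1 < 10) ∧ (0 ≤ p.2 ∧ p.2 < 10) := by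
    intro p hp
    obtain ⟨h1, h2⟩ := List.of_mem_zip hp
    rw [List.mem_reverse] at h1
    rw [hds] at h1 h2
    obtain ⟨c1, hc1, he1⟩ := List.mem_map.mp h1
    obtain ⟨c2, hc2, he2⟩ := List.mem_map.mp h2
    exact ⟨he1 ▸ dval_bounds c1 (hpre c1 hc1), he2 ▸ dval_bounds c2 (hpre c2 hc2)⟩
  have hcarry : (sch zs 0).2 = 0 := by
    rw [hzap, sch_append]
    have h01 := sch_carry01 (ds.reverse.zip ds) 0 hbounds (le_refl 0) (by norm_num)
    set c' := (sch (ds.reverse.zip ds) 0).2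
    rw [PySem.Int.floordiv_eq_ediv_of_pos (by norm_num)]
    omega
  have hval := sch_val zs 0
  rw [hcarry] at hval
  simp only [zero_mul, add_zero] at hval
  have hsum : valL digs = valL X + valL Y := by
    rw [hdigs, hval, hzs, valL_zip_add X Y (by omega)]
  rw [hsum]
  -- B's two folds
  rw [foldl_digits l hpre, ← hds]
  have hrev : l.reverse.foldl (fun a c => a * 10 + (PySem.Int.ofChars? [c]).getD 0) 0
      = valL ds := by
    rw [foldl_digits l.reverse (fun c hc => hpre c (List.mem_reverse.mp hc)),
      ← List.map_reverse, List.reverse_reverse, ← hds]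
  rw [hrev, hX, hY, valL_append_zero, valL_append_zero]

-- ===== VERDICT (by name: the statement is the Claim_ definition above) =====
theorem give_palindrome_spec : Claim_equal_give_palindrome := by
  intro number _hdom hpre
  unfold Spec_give_palindrome
  exact ports_agree number (List.all_eq_true.mp hpre)
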